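-- pv_equiv track=rewrite | github.com/super30admin/Hashing-1 | groupedAnagram.py | calculatePrime
-- ===== SOURCE A (Python) =====
-- def calculatePrime(word):
--     primes = [2, 3, 5, 7, 11, 13, 17, 19, 23, 29, 31, 37, 41,
--               43, 47, 53, 59, 61, 67, 71, 73, 79, 83, 89, 97, 101]
--     count = 1
--     for letter in word:
--         # ascii value of the letter - ascii value of a i.e 97 gives index of prime number for that letter
--         index = ord(letter)-ord('a')
--         count = primes[index]*count
--     return count
-- ===== SOURCE B (Python) =====
-- def calculatePrime(word):
--     primes = [2, 3, 5, 7, 11, 13, 17, 19, 23, 29, 31, 37, 41,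
--               43, 47, 53, 59, 61, 67, 71, 73, 79, 83, 89, 97, 101]
--     freq = {}
--     for ch in word:
--         freq[ch] = freq.get(ch, 0) + 1
--     product = 1
--     for ch, k in freq.items():
--         product *= primes[ord(ch) - ord('a')] ** k
--     return product
-- ===== Notes on version B (the rewrite author's own statement) =====
-- stated objective: alternative
-- what changed: B tallies letter frequencies into a dict in one scan and then multiplies primes[ord(ch)-97] ** count over the distinct letters, instead of A's one multiplication per letter.
import Mathlib
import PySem

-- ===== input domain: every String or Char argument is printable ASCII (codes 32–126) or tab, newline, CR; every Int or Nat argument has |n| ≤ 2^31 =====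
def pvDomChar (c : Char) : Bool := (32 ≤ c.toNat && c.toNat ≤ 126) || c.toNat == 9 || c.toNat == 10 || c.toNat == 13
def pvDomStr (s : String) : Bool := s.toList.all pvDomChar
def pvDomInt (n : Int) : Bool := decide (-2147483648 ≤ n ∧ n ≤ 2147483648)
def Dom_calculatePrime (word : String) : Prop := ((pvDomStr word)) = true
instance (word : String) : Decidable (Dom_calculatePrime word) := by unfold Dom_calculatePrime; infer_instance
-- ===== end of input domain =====

-- B replaces A's one-multiplication-per-letter loop by a frequency dict plus a
-- power per distinct letter (objective: alternative decomposition, same cost).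


-- the shared literal prime table of both Pythons
def pvPrimes : List Int := [2, 3, 5, 7, 11, 13, 17, 19, 23, 29, 31, 37, 41,
                            43, 47, 53, 59, 61, 67, 71, 73, 79, 83, 89, 97, 101]

-- ===== PORT A =====
-- primes[ord(letter)-97] is PySem.List.pyGetD (total under Pre_'s InRange condition)
def calculatePrime (word : String) : Int :=
  word.toList.foldl
    (fun count letter => PySem.List.pyGetD pvPrimes ((letter.toNat : Int) - 97) 0 * count) 1

-- ===== PORT B =====
def calculatePrime_alt (word : String) : Int :=
  let freq := word.toList.foldl
    (fun d ch => d.insert ch (d.getD ch 0 + 1)) (PySem.Dict.empty : PySem.Dict Char Int)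
  freq.items.foldl
    (fun product kv =>
      product * PySem.List.pyGetD pvPrimes ((kv.1.toNat : Int) - 97) 0 ^ kv.2.toNat) 1

-- ===== PRECONDITION & SPEC =====
-- Pre_ excludes exactly the words with a character outside codes 71..122, on which
-- Python A (and B) raises IndexError at primes[ord(letter)-97].
def Pre_calculatePrime (word : String) : Prop :=
  (word.toList.all (fun c => 71 ≤ c.toNat && c.toNat ≤ 122)) = true
instance (word : String) : Decidable (Pre_calculatePrime word) := by
  unfold Pre_calculatePrime; infer_instance
def pvWitness_calculatePrime : String := "anagram"

def Spec_calculatePrime (word : String) (out : Int) : Prop := out = calculatePrime_alt word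
instance (word : String) (out : Int) : Decidable (Spec_calculatePrime word out) := by
  unfold Spec_calculatePrime; infer_instance

-- ===== CLAIM (what is proved, stated in full; the proofs are below) =====
def Claim_equal_calculatePrime : Prop :=
  ∀ (word : String), Dom_calculatePrime word → Pre_calculatePrime word →
    Spec_calculatePrime word (calculatePrime word)

-- ===== LEMMAS AND PROOFS =====

-- A's loop is the product of the letter primes.
theorem pv_foldA (p : Char → Int) :
    ∀ (xs : List Char) (a : Int),
      xs.foldl (fun count letter => p letter * count) a = (xs.map p).prod * a := by
  intro xs
  induction xs with
  | nil => simp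
  | cons x xs ih => intro a; simp [List.foldl_cons, ih]; ring

-- B's second loop is the product of f over the items.
theorem pv_foldB (f : Char × Int → Int) :
    ∀ (l : List (Char × Int)) (a : Int),
      l.foldl (fun product kv => product * f kv) a = a * (l.map f).prod := by
  intro l
  induction l with
  | nil => simp
  | cons x l ih => intro a; simp [List.foldl_cons, ih]; ring

-- product over the distinct letters of p^count = product over all letters of p
theorem pv_dedup_pow (p : Char → Int) (xs : List Char) :
    ((PySem.Set.ofList xs).map (fun k => p k ^ xs.count k)).prod = (xs.map p).prod := by
  have hnd : (PySem.Set.ofList xs).Nodup := PySem.Set.nodup_ofList xs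
  have hfin : (PySem.Set.ofList xs).toFinset = xs.toFinset := by
    ext a; simp [List.mem_toFinset, PySem.Set.mem_ofList]
  rw [← List.prod_toFinset _ hnd, hfin, Finset.prod_list_map_count]

theorem calculatePrime_eq_alt (word : String) :
    calculatePrime word = calculatePrime_alt word := by
  unfold calculatePrime calculatePrime_alt
  rw [pv_foldA, PySem.Dict.foldl_insert_getD_add_one_eq_counter,
      pv_foldB, PySem.Dict.items_counter]
  simp only [List.map_map, Function.comp_def, Int.toNat_natCast]
  rw [pv_dedup_pow]
  ring

-- ===== VERDICT (by name: the statement is the Claim_ definition above) =====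
theorem calculatePrime_spec : Claim_equal_calculatePrime := by
  intro word _ _
  exact calculatePrime_eq_alt word
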